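-- pv_equiv track=rewrite | github.com/CristianLazoQuispe/CODEFORCES-Contest | CONTEST-DIV2/Round 716/C/C.py | solve
-- ===== SOURCE A (Python) =====
-- import math
--
-- def solve(n):
--     ans = [1]
--     p = 1
--     for i in range(2,n):
--         bandera = True
--         if math.gcd(i,n) == 1:
--            ans.append(i)
--            p = (p*i)%n
--     if p!=1:
--         ans = ans[:-1]
--     return ans
-- ===== SOURCE B (Python) =====
-- def solve(n):
--     # Factor n once (trial division), then test coprimality against the
--     # distinct prime factors instead of calling gcd for every i.
--     primes = []
--     m = abs(n)
--     d = 2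
--     while d * d <= m:
--         if m % d == 0:
--             primes.append(d)
--             while m % d == 0:
--                 m //= d
--         d += 1
--     if m > 1:
--         primes.append(m)
--     res = [1]
--     p = 1
--     for i in range(2, n):
--         if all(i % q for q in primes):
--             res.append(i)
--             p = p * i % n
--     return res if p == 1 else res[:-1]
-- ===== Notes on version B (the rewrite author's own statement) =====
-- stated objective: alternative
-- what changed: B factors n once by trial division and tests each residue for a common prime factor via a handful of divisibility checks, instead of A's per-element math.gcd call.
import Mathlib
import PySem

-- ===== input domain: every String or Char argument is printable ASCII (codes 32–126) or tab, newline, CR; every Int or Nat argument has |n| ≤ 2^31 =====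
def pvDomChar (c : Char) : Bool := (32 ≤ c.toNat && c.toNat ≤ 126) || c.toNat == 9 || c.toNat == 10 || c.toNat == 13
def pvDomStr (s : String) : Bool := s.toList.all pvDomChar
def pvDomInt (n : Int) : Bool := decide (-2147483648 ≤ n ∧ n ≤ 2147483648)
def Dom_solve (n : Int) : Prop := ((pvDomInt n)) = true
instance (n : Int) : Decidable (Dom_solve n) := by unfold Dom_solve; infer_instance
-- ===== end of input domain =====

-- B replaces A's per-element math.gcd test by one trial-division factorisation of n
-- followed by divisibility checks against n's distinct prime factors (objective: alternative).

-- ===== PORT A =====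
-- literal port of A: fold over range(2, n) carrying (ans, p); ans[:-1] is dropLast
-- (PySem.List.slice_to_neg_one); math.gcd = Int.gcd (gcd of absolute values).
def solve (n : Int) : List Int :=
  let st := (PySem.List.pyRange 2 n 1).foldl
    (fun (st : List Int × Int) i =>
      if Int.gcd i n == 1 then (st.1 ++ [i], PySem.Int.mod (st.2 * i) n) else st)
    ([1], 1)
  if st.2 != 1 then st.1.dropLast else st.1

-- ===== PORT B =====
-- all Python values here are nonnegative ints, ported as Nat (Nat % and / coincide
-- with Python's % and // on nonnegative operands)

-- inner `while m % d == 0: m //= d`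
def stripFac (m d : Nat) : Nat :=
  if h : 2 ≤ d ∧ 0 < m ∧ m % d = 0 then stripFac (m / d) d else m
  termination_by m
  decreasing_by exact Nat.div_lt_self h.2.1 (by omega)

theorem stripFac_le (m d : Nat) : stripFac m d ≤ m := by
  fun_induction stripFac m d with
  | case1 m h ih => exact le_trans ih (Nat.div_le_self m d)
  | case2 m h => exact le_refl m

-- outer `while d * d <= m` trial-division loop plus the trailing `if m > 1`
def tdiv (d m : Nat) (acc : List Int) : List Int :=
  if h : d * d ≤ m then
    if m % d = 0 then tdiv (d + 1) (stripFac m d) (acc ++ [(d : Int)])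
    else tdiv (d + 1) m acc
  else if 1 < m then acc ++ [(m : Int)] else acc
  termination_by m + 1 - d
  decreasing_by
  · have h1 : stripFac m d ≤ m := stripFac_le m d
    have h2 : d ≤ m := by
      rcases Nat.eq_zero_or_pos d with h0 | h0
      · omega
      · calc d = d * 1 := (Nat.mul_one d).symm
          _ ≤ d * d := Nat.mul_le_mul_left d h0
          _ ≤ m := h
    omega
  · have h2 : d ≤ m := by
      rcases Nat.eq_zero_or_pos d with h0 | h0
      · omega
      · calc d = d * 1 := (Nat.mul_one d).symm
          _ ≤ d * d := Nat.mul_le_mul_left d h0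
          _ ≤ m := h
    omega

def solve_alt (n : Int) : List Int :=
  let primes := tdiv 2 n.natAbs []
  let st := (PySem.List.pyRange 2 n 1).foldl
    (fun (st : List Int × Int) i =>
      if primes.all (fun q => PySem.Int.mod i q != 0) then
        (st.1 ++ [i], PySem.Int.mod (st.2 * i) n)
      else st)
    ([1], 1)
  if st.2 == 1 then st.1 else st.1.dropLast

-- ===== PRECONDITION & SPEC =====
def Spec_solve (n : Int) (out : List Int) : Prop := out = solve_alt n
instance (n : Int) (out : List Int) : Decidable (Spec_solve n out) := by unfold Spec_solve; infer_instance

-- ===== CLAIM (what is proved, stated in full; the proofs are below) =====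
def Claim_equal_solve : Prop := ∀ (n : Int), Dom_solve n → Spec_solve n (solve n)

-- ===== LEMMAS AND PROOFS =====

theorem stripFac_dvd (m d : Nat) : stripFac m d ∣ m := by
  fun_induction stripFac m d with
  | case1 m h ih =>
      have hdm : d ∣ m := Nat.dvd_of_mod_eq_zero h.2.2
      exact dvd_trans ih (Nat.div_dvd_of_dvd hdm)
  | case2 m h => exact dvd_refl m

theorem stripFac_pos (m d : Nat) (hm : 0 < m) : 0 < stripFac m d := by
  rcases Nat.eq_zero_or_pos (stripFac m d) with h0 | h0
  · have hdvd := stripFac_dvd m d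
    rw [h0] at hdvd
    have := Nat.eq_zero_of_zero_dvd hdvd
    omega
  · exact h0

theorem stripFac_not_dvd (m d : Nat) (hd : 2 ≤ d) (hm : 0 < m) : ¬ d ∣ stripFac m d := by
  fun_induction stripFac m d with
  | case1 m h ih =>
      exact ih (Nat.div_pos (Nat.le_of_dvd h.2.1 (Nat.dvd_of_mod_eq_zero h.2.2)) (by omega))
  | case2 m h =>
      intro hcon
      exact h ⟨hd, hm, Nat.dvd_iff_mod_eq_zero.mp hcon⟩

theorem stripFac_prime_dvd (d p : Nat) (hd : d.Prime) (hp : p.Prime) (hne : p ≠ d)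
    (m : Nat) (hpm : p ∣ m) : p ∣ stripFac m d := by
  fun_induction stripFac m d with
  | case1 m h ih =>
      apply ih
      have hdm : d ∣ m := Nat.dvd_of_mod_eq_zero h.2.2
      have hmeq : m = d * (m / d) := (Nat.mul_div_cancel' hdm).symm
      rw [hmeq] at hpm
      rcases (Nat.Prime.dvd_mul hp).mp hpm with hpd | hq
      · exact absurd ((Nat.prime_dvd_prime_iff_eq hp hd).mp hpd) hne
      · exact hq
  | case2 m h => exact hpm

theorem tdiv_spec (d m : Nat) (acc : List Int) (N : Nat) :
    2 ≤ d → 0 < m → m ∣ N →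
    (∀ q ∈ acc, ∃ k : Nat, q = (k : Int) ∧ 2 ≤ k ∧ k ∣ N) →
    (∀ p : Nat, p.Prime → p ∣ N → ((p : Int) ∈ acc ∨ p ∣ m)) →
    (∀ p : Nat, p.Prime → p ∣ m → d ≤ p) →
    (∀ q ∈ tdiv d m acc, ∃ k : Nat, q = (k : Int) ∧ 2 ≤ k ∧ k ∣ N) ∧
    (∀ p : Nat, p.Prime → p ∣ N → (p : Int) ∈ tdiv d m acc) := by
  induction d, m, acc using tdiv.induct with
  | case1 d m acc h hmod ih =>
      intro hd hm hmN hsound hcomp hlow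
      rw [tdiv, dif_pos h, if_pos hmod]
      have hdm : d ∣ m := Nat.dvd_of_mod_eq_zero hmod
      have hdprime : d.Prime := by
        have h1 : d.minFac ∣ m := dvd_trans (Nat.minFac_dvd d) hdm
        have h2 : d ≤ d.minFac := hlow _ (Nat.minFac_prime (by omega)) h1
        have h3 : d.minFac ≤ d := Nat.minFac_le (by omega)
        have h4 : d.minFac = d := le_antisymm h3 h2
        rw [← h4]
        exact Nat.minFac_prime (by omega)
      have hsp := stripFac_pos m d hm
      have hsd : stripFac m d ∣ m := stripFac_dvd m d
      apply ih (by omega) hsp (dvd_trans hsd hmN)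
      · intro q hq
        rcases List.mem_append.mp hq with hq | hq
        · exact hsound q hq
        · rcases List.mem_singleton.mp hq with rfl
          exact ⟨d, rfl, hd, dvd_trans hdm hmN⟩
      · intro p hp hpN
        rcases hcomp p hp hpN with hmem | hpm
        · exact Or.inl (List.mem_append.mpr (Or.inl hmem))
        · by_cases hpd : p = d
          · subst hpd
            exact Or.inl (List.mem_append.mpr (Or.inr (List.mem_singleton.mpr rfl)))
          · exact Or.inr (stripFac_prime_dvd d p hdprime hp hpd m hpm)
      · intro p hp hps
        have hge : d ≤ p := hlow p hp (dvd_trans hps hsd)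
        have hne : p ≠ d := by
          intro heq
          subst heq
          exact stripFac_not_dvd m p hd hm hps
        omega
  | case2 d m acc h hmod ih =>
      intro hd hm hmN hsound hcomp hlow
      rw [tdiv, dif_pos h, if_neg hmod]
      apply ih (by omega) hm hmN hsound hcomp
      intro p hp hpm
      have hge := hlow p hp hpm
      have hne : p ≠ d := by
        intro heq
        subst heq
        exact hmod (Nat.dvd_iff_mod_eq_zero.mp hpm)
      omega
  | case3 d m acc h h1 =>
      intro hd hm hmN hsound hcomp hlow
      rw [tdiv, dif_neg h, if_pos h1]
      have hmprime : m.Prime := by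
        by_contra hnp
        have hs : m.minFac * m.minFac ≤ m := by
          have := Nat.minFac_sq_le_self (by omega) hnp
          nlinarith [this]
        have hd2 : d ≤ m.minFac := hlow _ (Nat.minFac_prime (by omega)) (Nat.minFac_dvd m)
        have hdd : d * d ≤ m.minFac * m.minFac := Nat.mul_le_mul hd2 hd2
        omega
      constructor
      · intro q hq
        rcases List.mem_append.mp hq with hq | hq
        · exact hsound q hq
        · rcases List.mem_singleton.mp hq with rfl
          exact ⟨m, rfl, by omega, hmN⟩
      · intro p hp hpN
        rcases hcomp p hp hpN with hmem | hpm
        · exact List.mem_append.mpr (Or.inl hmem)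
        · have heq : p = m := (Nat.prime_dvd_prime_iff_eq hp hmprime).mp hpm
          subst heq
          exact List.mem_append.mpr (Or.inr (List.mem_singleton.mpr rfl))
  | case4 d m acc h h1 =>
      intro hd hm hmN hsound hcomp hlow
      rw [tdiv, dif_neg h, if_neg h1]
      refine ⟨hsound, ?_⟩
      intro p hp hpN
      rcases hcomp p hp hpN with hmem | hpm
      · exact hmem
      · have hle := Nat.le_of_dvd hm hpm
        have htwo := hp.two_le
        omega

theorem cond_eq (n i : Int) (hn : 3 ≤ n) (hi : 2 ≤ i) :
    (Int.gcd i n == 1) = ((tdiv 2 n.natAbs []).all fun q => PySem.Int.mod i q != 0) := by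
  have hN : 0 < n.natAbs := by omega
  obtain ⟨hsound, hcomp⟩ := tdiv_spec 2 n.natAbs [] n.natAbs (le_refl 2) hN (dvd_refl _)
    (by simp) (fun p _ hpN => Or.inr hpN) (fun p hp _ => hp.two_le)
  have hgcd : Int.gcd i n = Nat.gcd i.natAbs n.natAbs := rfl
  by_cases hg : Int.gcd i n = 1
  · rw [show (Int.gcd i n == 1) = true by simp [hg]]
    symm
    rw [List.all_eq_true]
    intro q hq
    rcases hsound q hq with ⟨k, rfl, hk2, hkN⟩
    simp only [bne_iff_ne, ne_eq]
    intro h0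
    have hdvd : (k : Int) ∣ i := (PySem.Int.mod_eq_zero_iff_dvd i k).mp h0
    have hk_i : k ∣ i.natAbs := by
      have := Int.natAbs_dvd_natAbs.mpr hdvd
      simpa using this
    have hk1 : k ∣ 1 := by
      have := Nat.dvd_gcd hk_i hkN
      rwa [← hgcd, hg] at this
    have := Nat.dvd_one.mp hk1
    omega
  · rw [show (Int.gcd i n == 1) = false by simp [hg]]
    symm
    rw [List.all_eq_false]
    have hgpos : 0 < Int.gcd i n := by
      rw [hgcd]
      exact Nat.gcd_pos_of_pos_left _ (by omega)
    have hp : (Int.gcd i n).minFac.Prime := Nat.minFac_prime hg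
    have hpg : (Int.gcd i n).minFac ∣ Int.gcd i n := Nat.minFac_dvd _
    have hp_i : (Int.gcd i n).minFac ∣ i.natAbs := by
      rw [hgcd] at hpg
      exact dvd_trans hpg (Nat.gcd_dvd_left _ _)
    have hp_N : (Int.gcd i n).minFac ∣ n.natAbs := by
      rw [hgcd] at hpg
      exact dvd_trans hpg (Nat.gcd_dvd_right _ _)
    refine ⟨((Int.gcd i n).minFac : Int), hcomp _ hp hp_N, ?_⟩
    have hdvd : ((Int.gcd i n).minFac : Int) ∣ i := by
      rw [← Int.natAbs_dvd_natAbs]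
      simpa using hp_i
    have h0 : PySem.Int.mod i ((Int.gcd i n).minFac : Int) = 0 :=
      (PySem.Int.mod_eq_zero_iff_dvd i _).mpr hdvd
    simp [h0]

theorem final_if (st : List Int × Int) :
    (if st.2 != 1 then st.1.dropLast else st.1)
      = (if st.2 == 1 then st.1 else st.1.dropLast) := by
  by_cases h : st.2 = 1 <;> simp [h]

-- ===== VERDICT (by name: the statement is the Claim_ definition above) =====
theorem solve_spec : Claim_equal_solve := by
  intro n _
  unfold Spec_solve solve solve_alt
  by_cases hn : n ≤ 2
  · rw [PySem.List.pyRange_one_eq_nil hn]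
    simp
  · rw [not_le] at hn
    have hn3 : 3 ≤ n := by omega
    have hfold :
        (PySem.List.pyRange 2 n 1).foldl
          (fun (st : List Int × Int) i =>
            if Int.gcd i n == 1 then (st.1 ++ [i], PySem.Int.mod (st.2 * i) n) else st)
          ([1], 1)
        = (PySem.List.pyRange 2 n 1).foldl
          (fun (st : List Int × Int) i =>
            if (tdiv 2 n.natAbs []).all (fun q => PySem.Int.mod i q != 0) then
              (st.1 ++ [i], PySem.Int.mod (st.2 * i) n)
            else st)
          ([1], 1) := by
      apply PySem.List.foldl_congr_mem
      intro acc x hx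
      have hx' := (PySem.List.mem_pyRange_one).mp hx
      rw [cond_eq n x hn3 hx'.1]
    rw [hfold]
    exact final_if _
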